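-- pv_equiv track=rewrite | github.com/DK905/CoolResp | CoolRespProject/modules/CR_reader.py | take_value
-- ===== SOURCE A (Python) =====
-- def take_value(row: 'Координата строки',
--                col: 'Координата столбца',
--                mgl: 'Список границ объединённых ячеек',
--                act: 'Нужна актуальная ячейка, или её правый сосед?'
--                ) -> 'Координаты ячейки, из которой нужно взять значение':
--
--     """ Функция получения координат истинного значения ячейки (в том числе, объединённой) """
--
--     # Индикатор объединённости ячейки
--     indicator = None
--
--     # Проверка актуальной ячейки на объединённость
--     for diap in mgl:
--         row_range = range(diap[0], diap[1])
--         col_range = range(diap[2], diap[3])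
--         # Если ячейка объединённая
--         if row in row_range and col in col_range:
--             indicator = diap[0], diap[2]
--             break
--
--     # Если нужно найти правого соседа актуальной ячейки
--     if not act:
--         # Если актуальная ячейка - объединённая
--         if indicator:
--             # То это учитывается в столбце
--             indicator = take_value(row, diap[3], mgl, True)
--         # Если актуальная ячейка - обычная
--         else:
--             # Получить значение из правого столбца
--             indicator = take_value(row, col+1, mgl, True)
--
--     # Если нужная ячейка - обычная, то вернуть её координаты
--     return indicator if indicator else (row, col)
-- ===== SOURCE B (Python) =====
-- def take_value(row, col, mgl, act):
--     """Coordinates of the true (possibly merged) cell value.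
--
--     Staged decomposition: first narrow mgl once to the ranges whose row
--     interval contains `row` (order preserved), then all column resolution
--     works on that smaller list; `act` only decides which column to resolve.
--     """
--     rows = [d for d in mgl if d[0] <= row < d[1]]
--
--     def hit(c):
--         return next((d for d in rows if d[2] <= c < d[3]), None)
--
--     if act:
--         nc = col
--     else:
--         h = hit(col)
--         nc = h[3] if h else col + 1
--     h = hit(nc)
--     return (h[0], h[2]) if h else (row, nc)
-- ===== Notes on version B (the rewrite author's own statement) =====
-- stated objective: alternative
-- what changed: Replaces A's self-recursion over the full list by a staged decomposition: one pass filters mgl down to the ranges whose row interval contains row, then column lookups (find-first) run only on that filtered list, with act merely selecting which column to resolve.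
import Mathlib
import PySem

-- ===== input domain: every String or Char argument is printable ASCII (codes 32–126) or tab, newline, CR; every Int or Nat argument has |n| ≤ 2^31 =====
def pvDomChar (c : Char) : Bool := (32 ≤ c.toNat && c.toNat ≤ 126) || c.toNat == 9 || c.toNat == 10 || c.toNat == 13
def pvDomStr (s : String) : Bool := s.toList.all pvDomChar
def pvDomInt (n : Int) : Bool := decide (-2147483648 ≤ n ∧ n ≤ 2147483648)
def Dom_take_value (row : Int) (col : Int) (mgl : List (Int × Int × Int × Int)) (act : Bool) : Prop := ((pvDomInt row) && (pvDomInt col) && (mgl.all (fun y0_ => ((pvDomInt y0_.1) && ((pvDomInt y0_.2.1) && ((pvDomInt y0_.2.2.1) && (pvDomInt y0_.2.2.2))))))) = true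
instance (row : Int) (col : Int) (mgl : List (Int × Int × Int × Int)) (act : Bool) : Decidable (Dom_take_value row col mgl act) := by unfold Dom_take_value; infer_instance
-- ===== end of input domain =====

-- B restructures A's recursion into a row-filter pass followed by column lookups on the filtered list; return value proved equal on all inputs.
-- ===== PORT A =====
-- A's for-loop with break: returns the first matching diap together with its indicator
def scanA (row : Int) (col : Int) : List (Int × Int × Int × Int) → Option ((Int × Int) × (Int × Int × Int × Int))
  | [] => none
  | d :: rest =>
    if (d.1 ≤ row ∧ row < d.2.1) ∧ (d.2.2.1 ≤ col ∧ col < d.2.2.2) then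
      some ((d.1, d.2.2.1), d)
    else scanA row col rest

def take_value (row : Int) (col : Int) (mgl : List (Int × Int × Int × Int)) (act : Bool) : Int × Int :=
  match scanA row col mgl with
  | some (ind, diap) =>
    if act then ind
    else take_value row diap.2.2.2 mgl true   -- recursive call with act = True
  | none =>
    if act then (row, col)
    else take_value row (col + 1) mgl true
termination_by (if act then 0 else 1)
decreasing_by all_goals simp_all

-- ===== PORT B =====
-- B's hit helper: first range in the row-filtered list whose column interval contains c
def hitB (rows : List (Int × Int × Int × Int)) (c : Int) : Option (Int × Int × Int × Int) :=
  rows.find? (fun d => decide (d.2.2.1 ≤ c ∧ c < d.2.2.2))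

def take_value_alt (row : Int) (col : Int) (mgl : List (Int × Int × Int × Int)) (act : Bool) : Int × Int :=
  let rows := mgl.filter (fun d => decide (d.1 ≤ row ∧ row < d.2.1))
  let nc : Int :=
    if act then col
    else match hitB rows col with
      | some h => h.2.2.2
      | none => col + 1
  match hitB rows nc with
  | some h => (h.1, h.2.2.1)
  | none => (row, nc)

-- ===== PRECONDITION & SPEC =====
def Spec_take_value (row : Int) (col : Int) (mgl : List (Int × Int × Int × Int)) (act : Bool) (out : Int × Int) : Prop := out = take_value_alt row col mgl act
instance (row : Int) (col : Int) (mgl : List (Int × Int × Int × Int)) (act : Bool) (out : Int × Int) : Decidable (Spec_take_value row col mgl act out) := by unfold Spec_take_value; infer_instance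

-- ===== CLAIM =====
def Claim_equal_take_value : Prop := ∀ (row : Int) (col : Int) (mgl : List (Int × Int × Int × Int)) (act : Bool), Dom_take_value row col mgl act → Spec_take_value row col mgl act (take_value row col mgl act)

-- ===== LEMMAS AND PROOFS =====
-- A's single scan equals B's row-filter followed by a column find?
theorem scanA_eq_hitB (row c : Int) (mgl : List (Int × Int × Int × Int)) :
    scanA row c mgl =
      (hitB (mgl.filter (fun d => decide (d.1 ≤ row ∧ row < d.2.1))) c).map
        (fun d => ((d.1, d.2.2.1), d)) := by
  induction mgl with
  | nil => rfl
  | cons d rest ih =>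
    simp only [scanA, List.filter_cons, hitB]
    by_cases hr : d.1 ≤ row ∧ row < d.2.1
    · by_cases hc : d.2.2.1 ≤ c ∧ c < d.2.2.2
      · rw [if_pos ⟨hr, hc⟩]
        simp [hr, hc]
      · rw [if_neg (by tauto)]
        rw [if_pos (by simpa using hr)]
        rw [List.find?_cons]
        simp only [decide_eq_false hc]
        exact ih
    · rw [if_neg (by tauto)]
      rw [if_neg (by simpa using hr)]
      exact ih

theorem take_value_true (row c : Int) (mgl : List (Int × Int × Int × Int)) :
    take_value row c mgl true =
      (match hitB (mgl.filter (fun d => decide (d.1 ≤ row ∧ row < d.2.1))) c with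
       | some h => (h.1, h.2.2.1)
       | none => (row, c)) := by
  rw [take_value, scanA_eq_hitB]
  cases hitB (mgl.filter (fun d => decide (d.1 ≤ row ∧ row < d.2.1))) c with
  | none => rfl
  | some h => rfl

-- ===== VERDICT =====
theorem take_value_spec : Claim_equal_take_value := by
  intro row col mgl act _
  unfold Spec_take_value take_value_alt
  cases act with
  | true =>
    simp only [if_true]
    rw [take_value_true]
  | false =>
    simp only [Bool.false_eq_true, if_false]
    rw [take_value, scanA_eq_hitB]
    cases hitB (mgl.filter (fun d => decide (d.1 ≤ row ∧ row < d.2.1))) col with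
    | none => simp [take_value_true]
    | some h => simp [take_value_true]
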